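-- pv_equiv track=rewrite | github.com/justZZY/Bert-BiLSTM-CRF-pytorch | spider.py | add_equip_name_tag
-- ===== SOURCE A (Python) =====
-- def add_equip_name_tag(word):
--     equip_tag_dic = {'start': 'B-EQUIP', 'mid': 'I-EQUIP', 'end': 'E-EQUIP'}
--     result = ''
--     i = 0
--     word_len = len(word)
--     for _ in word:
--         if i == 0:
--             result += equip_tag_dic['start'] + ' '
--         elif i == word_len - 1:
--             result += equip_tag_dic['end']
--         else:
--             result += equip_tag_dic['mid'] + ' '
--         i += 1
--     return result
-- ===== SOURCE B (Python) =====
-- def add_equip_name_tag(word):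
--     n = len(word)
--     if n == 0:
--         return ''
--     if n == 1:
--         return 'B-EQUIP '
--     return 'B-EQUIP ' + 'I-EQUIP ' * (n - 2) + 'E-EQUIP'
-- ===== Notes on version B (the rewrite author's own statement) =====
-- stated objective: simpler
-- what changed: Replaces the indexed character-by-character tagging loop with a closed-form construction: two length guards plus repeating the middle tag len(word)-2 times between the start and end tags.
import Mathlib
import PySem

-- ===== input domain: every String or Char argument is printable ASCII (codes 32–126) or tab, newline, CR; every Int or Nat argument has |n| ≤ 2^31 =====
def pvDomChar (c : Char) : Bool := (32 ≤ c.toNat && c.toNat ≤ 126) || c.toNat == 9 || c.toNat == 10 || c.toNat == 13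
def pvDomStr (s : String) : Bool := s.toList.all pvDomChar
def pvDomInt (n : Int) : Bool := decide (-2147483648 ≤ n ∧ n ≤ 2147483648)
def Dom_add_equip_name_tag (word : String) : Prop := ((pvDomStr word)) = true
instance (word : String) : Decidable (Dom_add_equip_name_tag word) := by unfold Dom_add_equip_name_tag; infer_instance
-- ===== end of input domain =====

-- B replaces A's indexed per-character loop by a closed-form construction
-- (length guards plus repetition of the middle tag); objective: simpler.

-- ===== PORT A =====
-- the literal dict {'start': …, 'mid': …, 'end': …}
def pvEquipTagDic : PySem.Dict String String :=
  PySem.Dict.ofList [("start", "B-EQUIP"), ("mid", "I-EQUIP"), ("end", "E-EQUIP")]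

-- one iteration of the 'for _ in word' loop: state = (result, i); strings kept as List Char
def pvEquipStep (word_len : Nat) (st : List Char × Nat) (_c : Char) : List Char × Nat :=
  let result :=
    if st.2 = 0 then
      st.1 ++ ((pvEquipTagDic.get? "start").getD "").toList ++ [' ']
    else if st.2 = word_len - 1 then
      st.1 ++ ((pvEquipTagDic.get? "end").getD "").toList
    else
      st.1 ++ ((pvEquipTagDic.get? "mid").getD "").toList ++ [' ']
  (result, st.2 + 1)

def add_equip_name_tag (word : String) : String :=
  let word_len := word.toList.length
  String.mk (word.toList.foldl (pvEquipStep word_len) ([], 0)).1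

-- ===== PORT B =====
def add_equip_name_tag_alt (word : String) : String :=
  let n := word.toList.length
  if n = 0 then ""
  else if n = 1 then "B-EQUIP "
  else String.mk ("B-EQUIP ".toList ++ (List.replicate (n - 2) "I-EQUIP ".toList).flatten
        ++ "E-EQUIP".toList)

-- ===== PRECONDITION & SPEC =====
def Spec_add_equip_name_tag (word : String) (out : String) : Prop := out = add_equip_name_tag_alt word
instance (word : String) (out : String) : Decidable (Spec_add_equip_name_tag word out) := by unfold Spec_add_equip_name_tag; infer_instance

-- ===== CLAIM (what is proved, stated in full; the proofs are below) =====
def Claim_equal_add_equip_name_tag : Prop := ∀ (word : String), Dom_add_equip_name_tag word → Spec_add_equip_name_tag word (add_equip_name_tag word)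

-- ===== LEMMAS AND PROOFS =====

theorem pvTagStart : ((pvEquipTagDic.get? "start").getD "").toList = "B-EQUIP".toList := by decide
theorem pvTagMid : ((pvEquipTagDic.get? "mid").getD "").toList = "I-EQUIP".toList := by decide
theorem pvTagEnd : ((pvEquipTagDic.get? "end").getD "").toList = "E-EQUIP".toList := by decide

-- After the first iteration the index is ≥ 1, so the 'start' branch is dead:
-- remaining characters get 'I-EQUIP ' except the last one (index n-1), which gets 'E-EQUIP'.
theorem pvEquipStep_tail (n : Nat) (l : List Char) :
    ∀ (i : Nat) (acc : List Char), 1 ≤ i → i + l.length = n →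
    (l.foldl (pvEquipStep n) (acc, i)).1 =
      acc ++ (List.replicate (l.length - 1) "I-EQUIP ".toList).flatten
          ++ (if l.length = 0 then [] else "E-EQUIP".toList) := by
  induction l with
  | nil => intro i acc _ _; simp
  | cons c t ih =>
    intro i acc hi hn
    have hne0 : i ≠ 0 := by omega
    by_cases ht : t = []
    · subst ht
      have hlast : i = n - 1 := by simp at hn; omega
      have hn1 : ¬ (n - 1 = 0) := by omega
      simp [pvEquipStep, hlast, hn1, pvTagEnd]
    · have hlen : t.length ≠ 0 := by simpa using (fun h => ht (List.eq_nil_of_length_eq_zero h))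
      have hnotlast : i ≠ n - 1 := by simp at hn; omega
      have hfold := ih (i + 1) (acc ++ ((pvEquipTagDic.get? "mid").getD "").toList ++ [' '])
        (by omega) (by simp at hn ⊢; omega)
      simp only [List.foldl_cons, pvEquipStep, hne0, hnotlast, ite_false]
      rw [hfold]
      have hrep : t.length - 1 + 1 = t.length := by omega
      cases t with
      | nil => simp at hlen
      | cons c' t' => simp [pvTagMid, List.replicate_succ]

theorem add_equip_name_tag_eq (word : String) :
    add_equip_name_tag word = add_equip_name_tag_alt word := by
  unfold add_equip_name_tag add_equip_name_tag_alt
  cases hw : word.toList with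
  | nil => decide
  | cons c t =>
    have hfirst : pvEquipStep (t.length + 1) ([], 0) c = ("B-EQUIP ".toList, 1) := by
      simp [pvEquipStep, pvTagStart]
    simp only [List.foldl_cons, List.length_cons]
    rw [hfirst, pvEquipStep_tail (t.length + 1) t 1 ("B-EQUIP ".toList) (by omega) (by omega)]
    cases t with
    | nil => simp; decide
    | cons c' t' =>
      have h1 : ¬ (t'.length + 1 + 1 = 0) := by omega
      have h2 : ¬ (t'.length + 1 + 1 = 1) := by omega
      have h3 : t'.length + 1 - 1 = t'.length := by omega
      have h4 : t'.length + 1 + 1 - 2 = t'.length := by omega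
      simp [h3, h4]

-- ===== VERDICT (by name: the statement is the Claim_ definition above) =====
theorem add_equip_name_tag_spec : Claim_equal_add_equip_name_tag := by
  intro word _
  unfold Spec_add_equip_name_tag
  exact add_equip_name_tag_eq word
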